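-- pv_equiv track=rewrite | github.com/TerryOtt/GpsRanging | generate-gps-ca-prn.py | _gps_ca_prn
-- ===== SOURCE A (Python) =====
-- SV = {
--    1: [2,6],
--    2: [3,7],
--    3: [4,8],
--    4: [5,9],
--    5: [1,9],
--    6: [2,10],
--    7: [1,8],
--    8: [2,9],
--    9: [3,10],
--   10: [2,3],
--   11: [3,4],
--   12: [5,6],
--   13: [6,7],
--   14: [7,8],
--   15: [8,9],
--   16: [9,10],
--   17: [1,4],
--   18: [2,5],
--   19: [3,6],
--   20: [4,7],
--   21: [5,8],
--   22: [6,9],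
--   23: [1,3],
--   24: [4,6],
--   25: [5,7],
--   26: [6,8],
--   27: [7,9],
--   28: [8,10],
--   29: [1,6],
--   30: [2,7],
--   31: [3,8],
--   32: [4,9],
-- }
--
-- def _gps_shift(register, feedback, output):
--     """GPS Shift Register
--
--     :param list feedback: which positions to use as feedback (1 indexed)
--     :param list output: which positions are output (1 indexed)
--     :returns output of shift register:
--
--     """
--
--     # calculate output
--     out = [register[i - 1] for i in output]
--     if len(out) > 1:
--         out = sum(out) % 2
--     else:
--         out = out[0]
--
--     # modulo 2 add feedback
--     fb = sum([register[i - 1] for i in feedback]) % 2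
--
--     # shift to the right
--     for i in reversed(range(len(register[1:]))):
--         register[i + 1] = register[i]
--
--     # put feedback in position 1
--     register[0] = fb
--
--     return out
--
-- def _gps_ca_prn(sv):
--     """Build the CA code (PRN) for a given satellite ID
--
--     :param int sv: satellite code (1-32)
--     :returns list: ca code for chosen satellite
--
--     """
--
--     # init registers
--     G1 = [1 for i in range(10)]
--     G2 = [1 for i in range(10)]
--
--     ca = []  # stuff output in here
--
--     # create sequence
--     for i in range(1023):
--         g1 = _gps_shift(G1, [3, 10], [10])
--         g2 = _gps_shift(G2, [2, 3, 6, 8, 9, 10], SV[sv])  # <- sat chosen here from table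
--
--         # modulo 2 add and append to the code
--         ca.append((g1 + g2) % 2)
--
--     # return C/A code!
--     return ca
-- ===== SOURCE B (Python) =====
-- SV = {
--    1: [2,6],   2: [3,7],   3: [4,8],   4: [5,9],
--    5: [1,9],   6: [2,10],  7: [1,8],   8: [2,9],
--    9: [3,10], 10: [2,3],  11: [3,4],  12: [5,6],
--   13: [6,7],  14: [7,8],  15: [8,9],  16: [9,10],
--   17: [1,4],  18: [2,5],  19: [3,6],  20: [4,7],
--   21: [5,8],  22: [6,9],  23: [1,3],  24: [4,6],
--   25: [5,7],  26: [6,8],  27: [7,9],  28: [8,10],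
--   29: [1,6],  30: [2,7],  31: [3,8],  32: [4,9],
-- }
--
-- def _gps_ca_prn(sv):
--     """Build the CA code (PRN) for a given satellite ID, with each 10-bit
--     LFSR held as a single integer (bit k = register position k+1)."""
--     t1, t2 = SV[sv]
--     g1 = g2 = 0b1111111111
--     ca = []
--     for _ in range(1023):
--         o1 = (g1 >> 9) & 1
--         o2 = ((g2 >> (t1 - 1)) ^ (g2 >> (t2 - 1))) & 1
--         ca.append(o1 ^ o2)
--         f1 = ((g1 >> 2) ^ (g1 >> 9)) & 1
--         f2 = ((g2 >> 1) ^ (g2 >> 2) ^ (g2 >> 5) ^ (g2 >> 7) ^ (g2 >> 8) ^ (g2 >> 9)) & 1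
--         g1 = ((g1 << 1) | f1) & 0x3FF
--         g2 = ((g2 << 1) | f2) & 0x3FF
--     return ca
-- ===== Notes on version B (the rewrite author's own statement) =====
-- stated objective: idiomatic
-- what changed: Each ten-bit shift register is held as a single integer advanced per step with one masked shift-or, and output/feedback bits are read with shifts and masks, replacing the list-of-cells registers and the element-shuffling inner shift loop of _gps_shift.
import Mathlib
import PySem

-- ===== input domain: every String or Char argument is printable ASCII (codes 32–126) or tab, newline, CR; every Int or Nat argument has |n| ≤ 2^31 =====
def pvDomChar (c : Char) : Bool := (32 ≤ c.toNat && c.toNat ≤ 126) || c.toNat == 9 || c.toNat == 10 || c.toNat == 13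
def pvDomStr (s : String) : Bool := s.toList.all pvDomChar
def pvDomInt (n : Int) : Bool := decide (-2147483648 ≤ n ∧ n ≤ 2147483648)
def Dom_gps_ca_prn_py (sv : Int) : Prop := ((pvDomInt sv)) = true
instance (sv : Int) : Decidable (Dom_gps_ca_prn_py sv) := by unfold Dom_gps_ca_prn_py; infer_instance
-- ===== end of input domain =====

-- ===== PORT A =====
-- B changes the data structure: each 10-bit LFSR is one integer advanced by bit
-- operations instead of a list of ten cells shuffled element by element (objective: idiomatic).

-- the SV tap table, as an insertion-ordered dict
def pvSV : PySem.Dict Int (List Int) :=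
  PySem.Dict.ofList
  [(1,[2,6]),(2,[3,7]),(3,[4,8]),(4,[5,9]),(5,[1,9]),(6,[2,10]),(7,[1,8]),(8,[2,9]),
   (9,[3,10]),(10,[2,3]),(11,[3,4]),(12,[5,6]),(13,[6,7]),(14,[7,8]),(15,[8,9]),(16,[9,10]),
   (17,[1,4]),(18,[2,5]),(19,[3,6]),(20,[4,7]),(21,[5,8]),(22,[6,9]),(23,[1,3]),(24,[4,6]),
   (25,[5,7]),(26,[6,8]),(27,[7,9]),(28,[8,10]),(29,[1,6]),(30,[2,7]),(31,[3,8]),(32,[4,9])]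

-- _gps_shift: returns (out, new register); the Python mutates `register` in place,
-- here the updated register is returned instead (the caller threads it).
def pvGpsShift (register feedback output : List Int) : Int × List Int :=
  -- out = [register[i-1] for i in output]; indices are always in range here, so getD 0 never fires
  let outl : List Int := output.map (fun i => ((PySem.List.pyGet? register (i - 1)).getD 0))
  let out : Int := if outl.length > 1 then PySem.Int.mod (outl.sum) 2 else outl.getD 0 0
  let fb : Int := PySem.Int.mod ((feedback.map (fun i => ((PySem.List.pyGet? register (i - 1)).getD 0))).sum) 2
  -- for i in reversed(range(len(register[1:]))): register[i+1] = register[i]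
  let reg := ((PySem.List.pyRange 0 ((register.drop 1).length) 1).reverse).foldl
      (fun (r : List Int) (i : Int) => r.set (i + 1).toNat (r.getD i.toNat 0)) register
  let reg := reg.set 0 fb
  (out, reg)

-- one iteration of _gps_ca_prn's loop body (state = (G1, G2, ca))
def pvCaStep (taps : List Int) (st : List Int × List Int × List Int) (_ : Int) :
    List Int × List Int × List Int :=
  let r1 := pvGpsShift st.1 [3, 10] [10]
  let r2 := pvGpsShift st.2.1 [2, 3, 6, 8, 9, 10] taps
  (r1.2, r2.2, st.2.2 ++ [PySem.Int.mod (r1.1 + r2.1) 2])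

def gps_ca_prn_py (sv : Int) : List Int :=
  let G1 : List Int := (List.range 10).map (fun _ => (1 : Int))
  let G2 : List Int := (List.range 10).map (fun _ => (1 : Int))
  -- SV[sv]: KeyError for sv outside the table, excluded by Pre_; getD [] never fires inside Pre_
  let st := (PySem.List.pyRange 0 1023 1).foldl
    (pvCaStep ((PySem.Dict.get? pvSV sv).getD [])) (G1, G2, ([] : List Int))
  st.2.2

-- ===== PORT B =====
-- one step of B's loop body on the packed-integer state (g1 g2 : Nat, 10 bits each)
def pvAltStep (t1 t2 : Nat) (st : Nat × Nat × List Int) (_ : Int) : Nat × Nat × List Int :=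
  let g1 := st.1
  let g2 := st.2.1
  let o1 := (g1 >>> 9) &&& 1
  let o2 := ((g2 >>> (t1 - 1)) ^^^ (g2 >>> (t2 - 1))) &&& 1
  let ca := st.2.2 ++ [(Int.ofNat (o1 ^^^ o2))]
  let f1 := ((g1 >>> 2) ^^^ (g1 >>> 9)) &&& 1
  let f2 := ((g2 >>> 1) ^^^ (g2 >>> 2) ^^^ (g2 >>> 5) ^^^ (g2 >>> 7) ^^^ (g2 >>> 8) ^^^ (g2 >>> 9)) &&& 1
  (((g1 <<< 1) ||| f1) &&& 0x3FF, ((g2 <<< 1) ||| f2) &&& 0x3FF, ca)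

def gps_ca_prn_py_alt (sv : Int) : List Int :=
  -- t1, t2 = SV[sv] (KeyError outside the table; the defaults never fire inside Pre_)
  let taps := (PySem.Dict.get? pvSV sv).getD [1, 1]
  let t1 := (taps.getD 0 1).toNat
  let t2 := (taps.getD 1 1).toNat
  let st := (PySem.List.pyRange 0 1023 1).foldl (pvAltStep t1 t2) (0x3FF, 0x3FF, ([] : List Int))
  st.2.2

-- ===== PRECONDITION & SPEC =====
-- Pre_ excludes exactly the sv values that are not keys of the SV table, where the Python A raises KeyError.
def Pre_gps_ca_prn_py (sv : Int) : Prop := 1 ≤ sv ∧ sv ≤ 32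
instance (sv : Int) : Decidable (Pre_gps_ca_prn_py sv) := by unfold Pre_gps_ca_prn_py; infer_instance
def pvWitness_gps_ca_prn_py : Int := (7)
def Spec_gps_ca_prn_py (sv : Int) (out : List Int) : Prop := out = gps_ca_prn_py_alt sv
instance (sv : Int) (out : List Int) : Decidable (Spec_gps_ca_prn_py sv out) := by unfold Spec_gps_ca_prn_py; infer_instance

-- ===== CLAIM (what is proved, stated in full; the proofs are below) =====
def Claim_equal_gps_ca_prn_py : Prop := ∀ (sv : Int), Dom_gps_ca_prn_py sv → Pre_gps_ca_prn_py sv → Spec_gps_ca_prn_py sv (gps_ca_prn_py sv)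

-- ===== LEMMAS AND PROOFS =====
-- the packed 10-bit register g, unpacked to A's list representation (bit k = register cell k)
def pvBits (g : Nat) : List Int := (List.range 10).map (fun k => (Int.ofNat ((g >>> k) &&& 1)))

theorem pvBits_eq (g : Nat) : pvBits g =
    [Int.ofNat (g &&& 1), Int.ofNat ((g >>> 1) &&& 1), Int.ofNat ((g >>> 2) &&& 1),
     Int.ofNat ((g >>> 3) &&& 1), Int.ofNat ((g >>> 4) &&& 1), Int.ofNat ((g >>> 5) &&& 1),
     Int.ofNat ((g >>> 6) &&& 1), Int.ofNat ((g >>> 7) &&& 1), Int.ofNat ((g >>> 8) &&& 1),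
     Int.ofNat ((g >>> 9) &&& 1)] := by
  simp [pvBits, List.range_succ]

theorem pvS1 (a0 a1 a2 a3 a4 a5 a6 a7 a8 a9 : Int) :
    pvGpsShift [a0,a1,a2,a3,a4,a5,a6,a7,a8,a9] [3, 10] [10] =
      (a9, [PySem.Int.mod (a2 + a9) 2, a0,a1,a2,a3,a4,a5,a6,a7,a8]) := by
  simp [pvGpsShift, PySem.List.pyGet?, PySem.List.pyRange, PySem.List.pyIdx?, List.range_succ]

theorem pvS2 (u v a0 a1 a2 a3 a4 a5 a6 a7 a8 a9 : Int) :
    pvGpsShift [a0,a1,a2,a3,a4,a5,a6,a7,a8,a9] [2, 3, 6, 8, 9, 10] [u, v] =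
      (PySem.Int.mod ((PySem.List.pyGet? [a0,a1,a2,a3,a4,a5,a6,a7,a8,a9] (u - 1)).getD 0
          + (PySem.List.pyGet? [a0,a1,a2,a3,a4,a5,a6,a7,a8,a9] (v - 1)).getD 0) 2,
       [PySem.Int.mod (a1 + a2 + a5 + a7 + a8 + a9) 2, a0,a1,a2,a3,a4,a5,a6,a7,a8]) := by
  simp [pvGpsShift, PySem.List.pyGet?, PySem.List.pyRange, PySem.List.pyIdx?, List.range_succ]
  ring_nf

theorem pvSel (g : Nat) (u : Int) (h1 : 1 ≤ u) (h10 : u ≤ 10) :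
    (PySem.List.pyGet? (pvBits g) (u - 1)).getD 0 = Int.ofNat ((g >>> (u.toNat - 1)) &&& 1) := by
  have h : u - 1 = ((u.toNat - 1 : Nat) : Int) := by omega
  rw [h, PySem.List.pyGet?_natCast]
  have hk : u.toNat - 1 < 10 := by omega
  rw [List.getElem?_eq_getElem (by simp [pvBits]; omega)]
  simp [pvBits]

-- bits are < 2
theorem pvAnd1_lt (x : Nat) : x &&& 1 < 2 := by
  have := Nat.and_le_right (n := x) (m := 1); omega

theorem pvXor2 (x y : Nat) (hx : x < 2) (hy : y < 2) :
    PySem.Int.mod (Int.ofNat x + Int.ofNat y) 2 = Int.ofNat (x ^^^ y) := by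
  interval_cases x <;> interval_cases y <;> decide

-- feedback of G1: sum mod 2 = xor
theorem pvF1 (g : Nat) :
    PySem.Int.mod (Int.ofNat ((g >>> 2) &&& 1) + Int.ofNat ((g >>> 9) &&& 1)) 2
      = Int.ofNat ((((g >>> 2) ^^^ (g >>> 9)) &&& 1)) := by
  rw [pvXor2 _ _ (pvAnd1_lt _) (pvAnd1_lt _), Nat.and_xor_distrib_right]

-- output of G2: xor of two selected bits, masked
theorem pvO2 (g : Nat) (s t : Nat) :
    ((g >>> s) &&& 1) ^^^ ((g >>> t) &&& 1) = ((g >>> s) ^^^ (g >>> t)) &&& 1 := by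
  rw [Nat.and_xor_distrib_right]

theorem pvXor6 (x1 x2 x3 x4 x5 x6 : Nat) (h1 : x1 < 2) (h2 : x2 < 2) (h3 : x3 < 2)
    (h4 : x4 < 2) (h5 : x5 < 2) (h6 : x6 < 2) :
    PySem.Int.mod (Int.ofNat x1 + Int.ofNat x2 + Int.ofNat x3 + Int.ofNat x4 + Int.ofNat x5 + Int.ofNat x6) 2
      = Int.ofNat (x1 ^^^ x2 ^^^ x3 ^^^ x4 ^^^ x5 ^^^ x6) := by
  interval_cases x1 <;> interval_cases x2 <;> interval_cases x3 <;>
    interval_cases x4 <;> interval_cases x5 <;> interval_cases x6 <;> decide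

set_option maxRecDepth 10000 in
theorem pvShiftBits : ∀ g ∈ List.range 1024, ∀ f ∈ List.range 2,
    pvBits (((g <<< 1) ||| f) &&& 1023) =
      Int.ofNat f :: [Int.ofNat (g &&& 1), Int.ofNat ((g >>> 1) &&& 1), Int.ofNat ((g >>> 2) &&& 1),
        Int.ofNat ((g >>> 3) &&& 1), Int.ofNat ((g >>> 4) &&& 1), Int.ofNat ((g >>> 5) &&& 1),
        Int.ofNat ((g >>> 6) &&& 1), Int.ofNat ((g >>> 7) &&& 1), Int.ofNat ((g >>> 8) &&& 1)] := by
  decide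

theorem pvStepEq (u v : Int) (hu1 : 1 ≤ u) (hu10 : u ≤ 10) (hv1 : 1 ≤ v) (hv10 : v ≤ 10)
    (g1 g2 : Nat) (h1 : g1 < 1024) (h2 : g2 < 1024) (ca : List Int) (x : Int) :
    pvCaStep [u, v] (pvBits g1, pvBits g2, ca) x =
      (pvBits (((g1 <<< 1) ||| (((g1 >>> 2) ^^^ (g1 >>> 9)) &&& 1)) &&& 1023),
       pvBits (((g2 <<< 1) ||| (((g2 >>> 1) ^^^ (g2 >>> 2) ^^^ (g2 >>> 5) ^^^ (g2 >>> 7) ^^^ (g2 >>> 8) ^^^ (g2 >>> 9)) &&& 1)) &&& 1023),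
       ca ++ [Int.ofNat (((g1 >>> 9) &&& 1) ^^^ (((g2 >>> (u.toNat - 1)) ^^^ (g2 >>> (v.toNat - 1))) &&& 1))]) := by
  have hsu := pvSel g2 u hu1 hu10
  have hsv := pvSel g2 v hv1 hv10
  rw [pvShiftBits g1 (by simpa using h1) _ (by simpa using pvAnd1_lt ((g1 >>> 2) ^^^ (g1 >>> 9))),
      pvShiftBits g2 (by simpa using h2) _ (by simpa using pvAnd1_lt _)]
  rw [pvBits_eq g2] at hsu hsv
  rw [pvBits_eq g1, pvBits_eq g2]
  simp only [pvCaStep, pvS1, pvS2, hsu, hsv]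
  refine congrArg₂ Prod.mk ?_ (congrArg₂ Prod.mk ?_ ?_)
  · rw [← pvF1 g1]
  · rw [pvXor6 _ _ _ _ _ _ (pvAnd1_lt _) (pvAnd1_lt _) (pvAnd1_lt _) (pvAnd1_lt _) (pvAnd1_lt _) (pvAnd1_lt _)]
    congr 1
    simp only [Nat.and_xor_distrib_right]
  · rw [pvXor2 _ _ (pvAnd1_lt _) (pvAnd1_lt _), pvO2,
        pvXor2 _ _ (pvAnd1_lt _) (pvAnd1_lt _)]

theorem pvAltStepEq (t1 t2 : Nat) (g1 g2 : Nat) (ca : List Int) (x : Int) :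
    pvAltStep t1 t2 (g1, g2, ca) x =
      (((g1 <<< 1) ||| (((g1 >>> 2) ^^^ (g1 >>> 9)) &&& 1)) &&& 1023,
       ((g2 <<< 1) ||| (((g2 >>> 1) ^^^ (g2 >>> 2) ^^^ (g2 >>> 5) ^^^ (g2 >>> 7) ^^^ (g2 >>> 8) ^^^ (g2 >>> 9)) &&& 1)) &&& 1023,
       ca ++ [Int.ofNat (((g1 >>> 9) &&& 1) ^^^ (((g2 >>> (t1 - 1)) ^^^ (g2 >>> (t2 - 1))) &&& 1))]) := rfl

theorem pvMasked_lt (x : Nat) : x &&& 1023 < 1024 := by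
  have := Nat.and_le_right (n := x) (m := 1023); omega

theorem pvFold (u v : Int) (hu1 : 1 ≤ u) (hu10 : u ≤ 10) (hv1 : 1 ≤ v) (hv10 : v ≤ 10) :
    ∀ (l : List Int) (g1 g2 : Nat), g1 < 1024 → g2 < 1024 → ∀ (ca : List Int),
      (l.foldl (pvCaStep [u, v]) (pvBits g1, pvBits g2, ca)).2.2
        = (l.foldl (pvAltStep u.toNat v.toNat) (g1, g2, ca)).2.2 := by
  intro l
  induction l with
  | nil => intro g1 g2 _ _ ca; rfl
  | cons a t ih =>
    intro g1 g2 h1 h2 ca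
    rw [List.foldl_cons, List.foldl_cons,
        pvStepEq u v hu1 hu10 hv1 hv10 g1 g2 h1 h2 ca a, pvAltStepEq]
    exact ih _ _ (pvMasked_lt _) (pvMasked_lt _) _

theorem pvInit_bits : (List.range 10).map (fun _ => (1 : Int)) = pvBits 1023 := by decide

theorem pvMain (sv u v : Int) (hb : 1 ≤ u ∧ u ≤ 10 ∧ 1 ≤ v ∧ v ≤ 10)
    (hlook : PySem.Dict.get? pvSV sv = some [u, v]) :
    gps_ca_prn_py sv = gps_ca_prn_py_alt sv := by
  unfold gps_ca_prn_py gps_ca_prn_py_alt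
  simp only [hlook, Option.getD_some, pvInit_bits]
  have h0 : ([u, v].getD 0 1) = u := rfl
  have h1 : ([u, v].getD 1 1) = v := rfl
  rw [h0, h1]
  exact pvFold u v hb.1 hb.2.1 hb.2.2.1 hb.2.2.2 _ 1023 1023 (by norm_num) (by norm_num) []

theorem pvCase (sv : Int) (h1 : 1 ≤ sv) (h2 : sv ≤ 32) :
    gps_ca_prn_py sv = gps_ca_prn_py_alt sv := by
  interval_cases sv
  · exact pvMain 1 2 6 (by norm_num) (by decide)
  · exact pvMain 2 3 7 (by norm_num) (by decide)
  · exact pvMain 3 4 8 (by norm_num) (by decide)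
  · exact pvMain 4 5 9 (by norm_num) (by decide)
  · exact pvMain 5 1 9 (by norm_num) (by decide)
  · exact pvMain 6 2 10 (by norm_num) (by decide)
  · exact pvMain 7 1 8 (by norm_num) (by decide)
  · exact pvMain 8 2 9 (by norm_num) (by decide)
  · exact pvMain 9 3 10 (by norm_num) (by decide)
  · exact pvMain 10 2 3 (by norm_num) (by decide)
  · exact pvMain 11 3 4 (by norm_num) (by decide)
  · exact pvMain 12 5 6 (by norm_num) (by decide)
  · exact pvMain 13 6 7 (by norm_num) (by decide)
  · exact pvMain 14 7 8 (by norm_num) (by decide)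
  · exact pvMain 15 8 9 (by norm_num) (by decide)
  · exact pvMain 16 9 10 (by norm_num) (by decide)
  · exact pvMain 17 1 4 (by norm_num) (by decide)
  · exact pvMain 18 2 5 (by norm_num) (by decide)
  · exact pvMain 19 3 6 (by norm_num) (by decide)
  · exact pvMain 20 4 7 (by norm_num) (by decide)
  · exact pvMain 21 5 8 (by norm_num) (by decide)
  · exact pvMain 22 6 9 (by norm_num) (by decide)
  · exact pvMain 23 1 3 (by norm_num) (by decide)
  · exact pvMain 24 4 6 (by norm_num) (by decide)
  · exact pvMain 25 5 7 (by norm_num) (by decide)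
  · exact pvMain 26 6 8 (by norm_num) (by decide)
  · exact pvMain 27 7 9 (by norm_num) (by decide)
  · exact pvMain 28 8 10 (by norm_num) (by decide)
  · exact pvMain 29 1 6 (by norm_num) (by decide)
  · exact pvMain 30 2 7 (by norm_num) (by decide)
  · exact pvMain 31 3 8 (by norm_num) (by decide)
  · exact pvMain 32 4 9 (by norm_num) (by decide)

-- ===== VERDICT (by name: the statement is the Claim_ definition above) =====
theorem gps_ca_prn_py_spec : Claim_equal_gps_ca_prn_py := by
  intro sv _ hpre
  exact pvCase sv hpre.1 hpre.2
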